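-- pv_equiv track=rewrite | github.com/thorelvin/AMS-HAN-Gateway | tests/test_firmware_contract.py | _firmware_split_fields
-- ===== SOURCE A (Python) =====
-- def _firmware_split_fields(text: str) -> list[str]:
--     fields: list[str] = [""]
--     escaping = False
--     for ch in text:
--         if escaping:
--             if ch == "n":
--                 fields[-1] += "\n"
--             elif ch == "r":
--                 fields[-1] += "\r"
--             else:
--                 fields[-1] += ch
--             escaping = False
--             continue
--         if ch == "\\":
--             escaping = True
--             continue
--         if ch == ",":
--             fields.append("")
--             continue
--         fields[-1] += ch
--     if escaping:
--         fields[-1] += "\\"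
--     return fields
-- ===== SOURCE B (Python) =====
-- def _decode(seg: str) -> str:
--     out = []
--     j = 0
--     m = len(seg)
--     while j < m:
--         ch = seg[j]
--         if ch == "\\" and j + 1 < m:
--             nxt = seg[j + 1]
--             out.append("\n" if nxt == "n" else "\r" if nxt == "r" else nxt)
--             j += 2
--         else:
--             out.append(ch)
--             j += 1
--     return "".join(out)
--
--
-- def _firmware_split_fields(text: str) -> list[str]:
--     # pass 1: cut into raw segments on unescaped commas, keeping escape pairs verbatim
--     segs = [[]]
--     i = 0
--     n = len(text)
--     while i < n:
--         ch = text[i]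
--         if ch == "\\":
--             if i + 1 < n:
--                 segs[-1].append(ch)
--                 segs[-1].append(text[i + 1])
--                 i += 2
--             else:
--                 segs[-1].append(ch)
--                 i += 1
--         elif ch == ",":
--             segs.append([])
--             i += 1
--         else:
--             segs[-1].append(ch)
--             i += 1
--     # pass 2: decode each raw segment
--     return [_decode("".join(s)) for s in segs]
-- ===== Notes on version B (the rewrite author's own statement) =====
-- stated objective: faster
-- what changed: Replaces A's single-pass escape-flag state machine that grows fields by repeated string concatenation (fields[-1] += ch) with a two-pass decomposition: pass 1 cuts the text into raw segments at unescaped commas collecting chars in lists, pass 2 decodes the escapes in each segment and joins once.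
import Mathlib
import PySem

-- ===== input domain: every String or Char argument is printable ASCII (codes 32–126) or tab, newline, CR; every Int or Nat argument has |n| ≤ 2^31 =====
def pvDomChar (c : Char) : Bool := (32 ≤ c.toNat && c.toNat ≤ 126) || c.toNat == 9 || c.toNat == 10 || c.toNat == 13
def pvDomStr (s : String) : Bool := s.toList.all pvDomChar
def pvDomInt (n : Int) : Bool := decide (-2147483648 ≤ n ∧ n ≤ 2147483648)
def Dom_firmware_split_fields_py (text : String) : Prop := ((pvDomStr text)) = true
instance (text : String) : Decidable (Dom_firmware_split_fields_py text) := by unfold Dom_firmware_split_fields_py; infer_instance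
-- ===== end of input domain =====

-- B replaces A's single escape-flag state machine (which grows fields by repeated
-- string concatenation) by two passes — raw split on unescaped commas into char lists,
-- then an escape decoder per segment — same exact behaviour, measured faster on large inputs.


-- ===== PORT A =====
-- fields are kept as lists of chars (PySem convention) and turned into Strings at the end
-- fields[-1] += s  (fields is always nonempty in A)
def appendLast : List (List Char) → List Char → List (List Char)
  | [], _ => []
  | [x], s => [x ++ s]
  | x :: xs, s => x :: appendLast xs s

-- A's for-loop with its escaping flag; the trailing `if escaping` is the base case
def aLoop : List Char → List (List Char) → Bool → List (List Char)
  | [], fields, escaping => if escaping then appendLast fields ['\\'] else fields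
  | c :: cs, fields, escaping =>
    if escaping then
      aLoop cs (appendLast fields (if c = 'n' then ['\n'] else if c = 'r' then ['\r'] else [c])) false
    else if c = '\\' then aLoop cs fields true
    else if c = ',' then aLoop cs (fields ++ [[]]) false
    else aLoop cs (appendLast fields [c]) false

def firmware_split_fields_py (text : String) : List String :=
  (aLoop text.toList [[]] false).map String.ofList

-- ===== PORT B =====
-- segs[-1].append(…): push chars onto the head segment (segments built front-first)
def prependHead (xs : List Char) : List (List Char) → List (List Char)
  | [] => [xs]
  | h :: t => (xs ++ h) :: t

-- pass 1: cut on unescaped commas, copying escape pairs verbatim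
def splitRaw : List Char → List (List Char)
  | [] => [[]]
  | ['\\'] => [['\\']]
  | '\\' :: d :: rest => prependHead ['\\', d] (splitRaw rest)
  | c :: cs => if c = ',' then [] :: splitRaw cs else prependHead [c] (splitRaw cs)

-- pass 2: apply the escape rules inside one segment (a trailing lone '\' is literal)
def decodeSeg : List Char → List Char
  | [] => []
  | '\\' :: d :: rest => (if d = 'n' then '\n' else if d = 'r' then '\r' else d) :: decodeSeg rest
  | c :: cs => c :: decodeSeg cs

def firmware_split_fields_py_alt (text : String) : List String :=
  (splitRaw text.toList).map (fun s => String.ofList (decodeSeg s))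

-- ===== PRECONDITION & SPEC =====
def Spec_firmware_split_fields_py (text : String) (out : List String) : Prop := out = firmware_split_fields_py_alt text
instance (text : String) (out : List String) : Decidable (Spec_firmware_split_fields_py text out) := by unfold Spec_firmware_split_fields_py; infer_instance

-- ===== CLAIM (what is proved, stated in full; the proofs are below) =====
def Claim_equal_firmware_split_fields_py : Prop := ∀ (text : String), Dom_firmware_split_fields_py text → Spec_firmware_split_fields_py text (firmware_split_fields_py text)

-- ===== LEMMAS AND PROOFS =====
-- merge B's decoded segments onto A's accumulated fields: head extends fields[-1], tail is appended
def glue (fields : List (List Char)) : List (List Char) → List (List Char)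
  | [] => fields
  | h :: t => appendLast fields h ++ t

theorem appendLast_empty (fs : List (List Char)) : appendLast fs [] = fs := by
  induction fs with
  | nil => rfl
  | cons x xs ih =>
    cases xs with
    | nil => simp [appendLast]
    | cons y ys => simp only [appendLast] at ih ⊢; rw [ih]

theorem appendLast_append (fs : List (List Char)) (a b : List Char) :
    appendLast fs (a ++ b) = appendLast (appendLast fs a) b := by
  induction fs with
  | nil => rfl
  | cons x xs ih =>
    cases xs with
    | nil => simp [appendLast]
    | cons y ys =>
      obtain ⟨z, zs, hz⟩ : ∃ z zs, appendLast (y :: ys) a = z :: zs := by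
        cases ys <;> exact ⟨_, _, rfl⟩
      simp only [appendLast] at ih ⊢
      rw [ih, hz]
      simp [appendLast]

theorem appendLast_concat (fs : List (List Char)) (a : List Char) :
    appendLast (fs ++ [[]]) a = fs ++ [a] := by
  induction fs with
  | nil => simp [appendLast]
  | cons x xs ih =>
    cases xs with
    | nil => simp [appendLast]
    | cons y ys => simp [appendLast] at ih ⊢; exact ih

theorem splitRaw_ne_nil (cs : List Char) : splitRaw cs ≠ [] := by
  fun_induction splitRaw cs with
  | case1 => simp
  | case2 => simp
  | case3 d rest ih =>
    cases h : splitRaw rest with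
    | nil => exact absurd h ih
    | cons a t => simp [prependHead, h]
  | case4 cs _ _ ih => simp
  | case5 c cs _ _ hc ih =>
    cases h : splitRaw cs with
    | nil => exact absurd h ih
    | cons a t => simp [prependHead, hc, h]

theorem decodeSeg_cons (c : Char) (a : List Char) (hc : c ≠ '\\') :
    decodeSeg (c :: a) = c :: decodeSeg a := by
  cases a with
  | nil => simp [decodeSeg]
  | cons b bs => simp [decodeSeg, hc]

theorem aLoop_eq (cs : List Char) :
    ∀ fields, aLoop cs fields false = glue fields ((splitRaw cs).map decodeSeg) := by
  fun_induction splitRaw cs with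
  | case1 =>
    intro fields
    simp [aLoop, glue, decodeSeg, appendLast_empty]
  | case2 =>
    intro fields
    simp [aLoop, glue, decodeSeg]
  | case3 d rest ih =>
    intro fields
    obtain ⟨a, t, h⟩ : ∃ a t, splitRaw rest = a :: t := by
      cases h : splitRaw rest with
      | nil => exact absurd h (splitRaw_ne_nil rest)
      | cons a t => exact ⟨a, t, rfl⟩
    have e : aLoop ('\\' :: d :: rest) fields false
        = aLoop rest (appendLast fields (if d = 'n' then ['\n'] else if d = 'r' then ['\r'] else [d])) false := by
      simp [aLoop]
    rw [e, ih, h]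
    simp only [prependHead, glue, List.map_cons, List.cons_append, List.nil_append]
    have hd : decodeSeg ('\\' :: d :: a)
        = (if d = 'n' then ['\n'] else if d = 'r' then ['\r'] else [d]) ++ decodeSeg a := by
      by_cases hn : d = 'n' <;> by_cases hr : d = 'r' <;> simp [decodeSeg, hn, hr]
    rw [hd, appendLast_append]
  | case4 cs _ _ ih =>
    intro fields
    obtain ⟨a, t, h⟩ : ∃ a t, splitRaw cs = a :: t := by
      cases h : splitRaw cs with
      | nil => exact absurd h (splitRaw_ne_nil cs)
      | cons a t => exact ⟨a, t, rfl⟩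
    have e : aLoop (',' :: cs) fields false = aLoop cs (fields ++ [[]]) false := by
      simp [aLoop]
    rw [e, ih, h]
    simp [glue, decodeSeg, appendLast_empty, appendLast_concat]
  | case5 c cs hne1 hne2 hc ih =>
    intro fields
    have hcb : c ≠ '\\' := by
      intro hb; subst hb
      cases cs with
      | nil => exact hne1 rfl rfl
      | cons d rest => exact hne2 d rest rfl rfl
    obtain ⟨a, t, h⟩ : ∃ a t, splitRaw cs = a :: t := by
      cases h : splitRaw cs with
      | nil => exact absurd h (splitRaw_ne_nil cs)
      | cons a t => exact ⟨a, t, rfl⟩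
    have e : aLoop (c :: cs) fields false = aLoop cs (appendLast fields [c]) false := by
      simp [aLoop, hcb, hc]
    rw [e, ih, h]
    simp only [prependHead, glue, List.map_cons, List.cons_append, List.nil_append]
    rw [decodeSeg_cons c a hcb]
    have : (c :: decodeSeg a) = [c] ++ decodeSeg a := rfl
    rw [this, appendLast_append]

-- ===== VERDICT (by name: the statement is the Claim_ definition above) =====
theorem firmware_split_fields_py_spec : Claim_equal_firmware_split_fields_py := by
  intro text _
  unfold Spec_firmware_split_fields_py firmware_split_fields_py firmware_split_fields_py_alt
  rw [aLoop_eq]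
  obtain ⟨a, t, h⟩ : ∃ a t, splitRaw text.toList = a :: t := by
    cases h : splitRaw text.toList with
    | nil => exact absurd h (splitRaw_ne_nil _)
    | cons a t => exact ⟨a, t, rfl⟩
  rw [h]
  simp [glue, appendLast]
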